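-- pv_equiv track=rewrite | github.com/mancbg/AlgorithmicProblemSolving | VogonZoo.py | vogon_zoo
-- ===== SOURCE A (Python) =====
-- def vogon_zoo(dragon_bloods, threshold):
--     max_dragons = 0
--
--     dragon_bloods = sorted(dragon_bloods)
--     current = dragon_bloods[0] - threshold
--
--     for blood_type in dragon_bloods:
--         if blood_type - current >= threshold:
--             max_dragons += 1
--             current = blood_type
--
--     return max_dragons
-- ===== SOURCE B (Python) =====
-- def _bisect_left(s, x):
--     # hand-written bisect_left (A imports nothing, so no bisect import);
--     # identical to the standard library's algorithm
--     lo, hi = 0, len(s)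
--     while lo < hi:
--         mid = (lo + hi) // 2
--         if s[mid] < x:
--             lo = mid + 1
--         else:
--             hi = mid
--     return lo
--
--
-- def vogon_zoo(dragon_bloods, threshold):
--     s = sorted(dragon_bloods)
--     cur = s[0]                 # IndexError on empty input, as in the original
--     if threshold <= 0:
--         return len(s)          # every dragon qualifies when the gap may be <= 0
--     count = 1
--     n = len(s)
--     while True:
--         j = _bisect_left(s, cur + threshold)
--         if j >= n:
--             return count
--         count += 1
--         cur = s[j]
-- ===== Notes on version B (the rewrite author's own statement) =====
-- stated objective: alternative
-- what changed: Instead of A's full scan over every sorted element with a counting branch, B returns len(s) immediately when threshold <= 0 and otherwise visits only the selected dragons, binary-searching (bisect_left) for the next blood value at least current + threshold.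
import Mathlib
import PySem

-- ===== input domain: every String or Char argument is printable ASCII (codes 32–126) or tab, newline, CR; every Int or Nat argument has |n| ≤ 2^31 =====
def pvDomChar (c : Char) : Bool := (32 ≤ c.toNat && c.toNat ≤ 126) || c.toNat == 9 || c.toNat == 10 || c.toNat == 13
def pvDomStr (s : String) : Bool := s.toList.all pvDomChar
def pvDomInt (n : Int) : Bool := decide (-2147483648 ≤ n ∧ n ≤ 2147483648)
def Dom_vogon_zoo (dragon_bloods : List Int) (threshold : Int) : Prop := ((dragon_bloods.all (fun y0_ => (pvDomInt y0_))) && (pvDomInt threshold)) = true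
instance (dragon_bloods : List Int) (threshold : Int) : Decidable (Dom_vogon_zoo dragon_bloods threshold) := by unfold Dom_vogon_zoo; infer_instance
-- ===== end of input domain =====

-- B answers len(s) outright for threshold ≤ 0 and otherwise walks only the selected
-- dragons, jumping with binary search, instead of A's element-by-element scan; objective: alternative.

-- ===== PORT A =====
-- literal port of A: sort, current = dragon_bloods[0] - threshold (IndexError on the
-- empty list, modelled by pyGet? = none and excluded by Pre_), then one pass counting
-- every element with blood_type - current >= threshold.
def vogon_zoo (dragon_bloods : List Int) (threshold : Int) : Int :=
  let s := PySem.List.sorted dragon_bloods (fun x => x) false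
  match PySem.List.pyGet? s 0 with
  | none => 0  -- unreachable under Pre_ (Python raises IndexError here)
  | some h =>
    (s.foldl (fun (st : Int × Int) blood_type =>
        if blood_type - st.2 ≥ threshold then (st.1 + 1, blood_type) else st)
      (0, h - threshold)).1

-- ===== PORT B =====
-- Source B's hand-written _bisect_left is byte-for-byte the standard-library bisect_left
-- algorithm; it is ported as PySem.List.bisectLeft (exact for it).  Source B's 'while True'
-- loop becomes vzJump with fuel s.length — a totality guard only: each jump moves
-- strictly right, so the fuel is never exhausted before the loop's own exit fires.
def vzJump (s : List Int) (threshold cur count : Int) : Nat → Int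
  | 0 => count
  | fuel + 1 =>
    let j := PySem.List.bisectLeft s (cur + threshold)
    if s.length ≤ j then count
    else vzJump s threshold (s.getD j 0) (count + 1) fuel

def vogon_zoo_alt (dragon_bloods : List Int) (threshold : Int) : Int :=
  let s := PySem.List.sorted dragon_bloods (fun x => x) false
  match s with
  | [] => 0  -- unreachable under Pre_ (Source B raises IndexError at s[0])
  | c0 :: _ =>
    if threshold ≤ 0 then (s.length : Int)
    else vzJump s threshold c0 1 s.length

-- ===== PRECONDITION & SPEC =====
-- Pre_ excludes only the empty list, on which both Pythons raise IndexError.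
def Pre_vogon_zoo (dragon_bloods : List Int) (threshold : Int) : Prop :=
  dragon_bloods ≠ []
instance (dragon_bloods : List Int) (threshold : Int) : Decidable (Pre_vogon_zoo dragon_bloods threshold) := by unfold Pre_vogon_zoo; infer_instance
def pvWitness_vogon_zoo : List Int × Int := ([3, 1, 7, 2], 2)

def Spec_vogon_zoo (dragon_bloods : List Int) (threshold : Int) (out : Int) : Prop := out = vogon_zoo_alt dragon_bloods threshold
instance (dragon_bloods : List Int) (threshold : Int) (out : Int) : Decidable (Spec_vogon_zoo dragon_bloods threshold out) := by unfold Spec_vogon_zoo; infer_instance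

-- ===== CLAIM (what is proved, stated in full; the proofs are below) =====
def Claim_equal_vogon_zoo : Prop := ∀ (dragon_bloods : List Int) (threshold : Int), Dom_vogon_zoo dragon_bloods threshold → Pre_vogon_zoo dragon_bloods threshold → Spec_vogon_zoo dragon_bloods threshold (vogon_zoo dragon_bloods threshold)

-- ===== LEMMAS AND PROOFS =====

-- A's fold step, named (definitionally equal to the inline lambda in the port)
def vzStep (t : Int) (st : Int × Int) (b : Int) : Int × Int :=
  if b - st.2 ≥ t then (st.1 + 1, b) else st

-- threshold ≤ 0: A's scan counts every element of the sorted list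
theorem vz_count_all (t : Int) (ht : t ≤ 0) :
    ∀ (l : List Int) (cur c : Int), l.Pairwise (· ≤ ·) →
      (∀ x ∈ l, cur + t ≤ x) →
      (l.foldl (vzStep t) (c, cur)).1 = c + l.length := by
  intro l
  induction l with
  | nil => intro cur c _ _; simp
  | cons x xs ih =>
    intro cur c hp hlo
    have hx : cur + t ≤ x := hlo x (by simp)
    have hstep : vzStep t (c, cur) x = (c + 1, x) := by
      simp [vzStep]; omega
    have hp' := (List.pairwise_cons.mp hp)
    have := ih x (c + 1) hp'.2 (fun y hy => by
      have := hp'.1 y hy; omega)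
    simp only [List.foldl_cons, hstep, this]
    simp; omega

-- elements strictly below cur + t leave A's state unchanged
theorem vz_skip (t : Int) (l1 l2 : List Int) (c cur : Int)
    (h : ∀ y ∈ l1, y - cur < t) :
    (l1 ++ l2).foldl (vzStep t) (c, cur) = l2.foldl (vzStep t) (c, cur) := by
  induction l1 with
  | nil => simp
  | cons y ys ih =>
    have hy : y - cur < t := h y (by simp)
    simp only [List.cons_append, List.foldl_cons]
    rw [show vzStep t (c, cur) y = (c, cur) by simp [vzStep]; omega]
    exact ih (fun z hz => h z (by simp [hz]))

-- the jump loop computes the same count as A's scan over the remaining suffix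
theorem vz_jump_eq (s : List Int) (t : Int) (hs : s.Pairwise (· ≤ ·)) (ht : 0 < t) :
    ∀ (fuel : Nat) (i : Nat) (c : Int) (hi : i < s.length), s.length - i ≤ fuel →
      ((s.drop (i + 1)).foldl (vzStep t) (c, s[i])).1 = vzJump s t s[i] c fuel := by
  intro fuel
  induction fuel with
  | zero => intro i c hi hf; omega
  | succ fuel ih =>
    intro i c hi hf
    set x := s[i] + t with hx
    set j := PySem.List.bisectLeft s x with hj
    obtain ⟨hjle, hlt, hge⟩ := PySem.List.bisectLeft_spec s x hs
    rw [← hj] at hjle hlt hge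
    have hij : i + 1 ≤ j := by
      by_contra hcon
      have : j ≤ i := by omega
      have := hge i hi this
      omega
    have hskip : ∀ y ∈ (s.drop (i + 1)).take (j - (i + 1)), y - s[i] < t := by
      intro y hy
      obtain ⟨k, hk, hky⟩ := List.mem_iff_getElem.mp hy
      simp only [List.length_take, List.length_drop] at hk
      have hk2 : k < j - (i + 1) := by omega
      have hidx : i + 1 + k < s.length := by omega
      rw [List.getElem_take, List.getElem_drop] at hky
      have hylt := hlt (i + 1 + k) hidx (by omega)
      rw [hky] at hylt
      omega
    by_cases hjn : j < s.length
    · have hsplit : s.drop (i + 1)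
          = (s.drop (i + 1)).take (j - (i + 1)) ++ s.drop j := by
        conv_lhs => rw [← List.take_append_drop (j - (i + 1)) (s.drop (i + 1))]
        rw [List.drop_drop, Nat.add_sub_cancel' hij]
      rw [hsplit, vz_skip t _ _ c s[i] hskip]
      rw [List.drop_eq_getElem_cons hjn]
      simp only [List.foldl_cons]
      rw [show vzStep t (c, s[i]) s[j] = (c + 1, s[j]) by
        have := hge j hjn (le_refl j); simp [vzStep]; omega]
      rw [ih j (c + 1) hjn (by omega)]
      rw [show vzJump s t s[i] c (fuel+1)
            = vzJump s t (s.getD j 0) (c + 1) fuel by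
        simp only [vzJump, ← hx, ← hj]
        rw [if_neg (by omega)]]
      congr 1
      rw [List.getD_eq_getElem?_getD]
      simp [hjn]
    · have hj2 : j - (i + 1) = (s.drop (i+1)).length := by
        simp [List.length_drop]; omega
      have hall : ∀ y ∈ s.drop (i + 1), y - s[i] < t := by
        intro y hy
        apply hskip
        rwa [hj2, List.take_length]
      have := vz_skip t (s.drop (i + 1)) [] c s[i] hall
      simp only [List.append_nil] at this
      rw [this]
      rw [show vzJump s t s[i] c (fuel+1) = c by
        simp only [vzJump, ← hx, ← hj]
        rw [if_pos (by omega)]]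
      rfl

-- the two port bodies agree on any sorted nonempty list
theorem vz_core (t : Int) (c0 : Int) (rest : List Int)
    (hs : (c0 :: rest).Pairwise (· ≤ ·)) :
    (match PySem.List.pyGet? (c0 :: rest) 0 with
     | none => (0 : Int)
     | some h =>
       ((c0 :: rest).foldl (fun (st : Int × Int) b =>
           if b - st.2 ≥ t then (st.1 + 1, b) else st) (0, h - t)).1)
    = (match c0 :: rest with
       | [] => (0 : Int)
       | c :: _ => if t ≤ 0 then ((c0 :: rest).length : Int)
                   else vzJump (c0 :: rest) t c 1 (c0 :: rest).length) := by
  have hget : PySem.List.pyGet? (c0 :: rest) 0 = some c0 :=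
    PySem.List.pyGet?_zero_cons ..
  rw [hget]
  show ((c0 :: rest).foldl (vzStep t) (0, c0 - t)).1
      = if t ≤ 0 then ((c0 :: rest).length : Int)
        else vzJump (c0 :: rest) t c0 1 (c0 :: rest).length
  by_cases ht : t ≤ 0
  · simp only [if_pos ht]
    have hlo : ∀ x ∈ c0 :: rest, (c0 - t) + t ≤ x := by
      intro x hx
      rcases List.mem_cons.mp hx with rfl | hx'
      · omega
      · have := (List.pairwise_cons.mp hs).1 x hx'; omega
    rw [vz_count_all t ht (c0 :: rest) (c0 - t) 0 hs hlo]
    simp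
  · have ht' : 0 < t := by omega
    simp only [if_neg ht]
    have hstep : vzStep t (0, c0 - t) c0 = (1, c0) := by
      simp [vzStep]
    simp only [List.foldl_cons, hstep]
    have h0 : (0:Nat) < (c0 :: rest).length := by simp
    have := vz_jump_eq (c0 :: rest) t hs ht' ((c0 :: rest).length) 0 1 h0 (by omega)
    simpa using this

theorem vogon_zoo_eq (bs : List Int) (t : Int) (h : bs ≠ []) :
    vogon_zoo bs t = vogon_zoo_alt bs t := by
  have hs : (PySem.List.sorted bs (fun x => x) false).Pairwise (· ≤ ·) := by
    have := PySem.List.sorted_pairwise bs (fun x => x)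
    simpa using this
  have hne : PySem.List.sorted bs (fun x => x) false ≠ [] := by
    rw [Ne, PySem.List.sorted_eq_nil_iff]; exact h
  unfold vogon_zoo vogon_zoo_alt
  cases hcons : PySem.List.sorted bs (fun x => x) false with
  | nil => exact absurd hcons hne
  | cons c0 rest =>
    rw [hcons] at hs
    exact vz_core t c0 rest hs

-- ===== VERDICT (by name: the statement is the Claim_ definition above) =====
theorem vogon_zoo_spec : Claim_equal_vogon_zoo := by
  intro dragon_bloods threshold _ hpre
  unfold Spec_vogon_zoo
  exact vogon_zoo_eq dragon_bloods threshold hpre
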